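-- pv_equiv track=rewrite | github.com/ckswls56/BaejoonHub | 프로그래머스/3/12938. 최고의 집합/최고의 집합.py | solution
-- ===== SOURCE A (Python) =====
-- def solution(n, s):
--     a = s // n
--     b = s % n
--     if a < 1:
--         return [-1]
--
--
--     answer = [a]*n
--
--     for i in range(b):
--         answer[i]+=1
--
--     answer.sort()
--
--     ##s를 n으로 나누고 나머지들을 더해준다!
--
--     return answer
-- ===== SOURCE B (Python) =====
-- def solution(n, s):
--     if s // n < 1:
--         return [-1]
--     # greedy: for each remaining slot count k = n..1, take the floor share rem // k;
--     # this emits the sorted minimal-max set directly, one division per element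
--     answer = []
--     rem = s
--     for k in range(n, 0, -1):
--         v = rem // k
--         answer.append(v)
--         rem -= v
--     return answer
-- ===== Notes on version B (the rewrite author's own statement) =====
-- stated objective: alternative
-- what changed: B replaces A's allocate-[a]*n / increment-first-b-slots / sort pipeline by a single greedy pass that, for each remaining slot count k = n..1, emits rem // k and subtracts it, producing the sorted answer directly with no mod, no in-place increments and no sort.
import Mathlib
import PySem

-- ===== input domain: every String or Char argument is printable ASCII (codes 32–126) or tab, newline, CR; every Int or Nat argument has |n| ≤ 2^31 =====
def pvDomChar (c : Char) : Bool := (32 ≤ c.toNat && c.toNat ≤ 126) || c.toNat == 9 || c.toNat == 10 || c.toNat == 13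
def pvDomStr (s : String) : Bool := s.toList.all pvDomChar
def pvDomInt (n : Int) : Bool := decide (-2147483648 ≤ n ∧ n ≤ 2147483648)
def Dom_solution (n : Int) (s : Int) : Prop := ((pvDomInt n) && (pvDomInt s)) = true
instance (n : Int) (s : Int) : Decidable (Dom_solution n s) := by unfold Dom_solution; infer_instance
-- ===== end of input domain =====

-- B replaces A's fill/increment/sort pipeline with a single greedy pass emitting rem // k
-- for k = n..1 (sorted output falls out directly); objective: alternative (no sort, no mod).


-- ===== PORT A =====
def solution (n : Int) (s : Int) : List Int :=
  let a := PySem.Int.floordiv s n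
  let b := PySem.Int.mod s n
  if a < 1 then [-1]
  else
    let answer := PySem.List.pyRepeat [a] n
    let answer := (PySem.List.pyRange 0 b 1).foldl
      (fun ans i => PySem.List.pySetD ans i (PySem.List.pyGetD ans i 0 + 1)) answer
    PySem.List.sorted answer (fun x => x) false

-- ===== PORT B =====
def solution_alt (n : Int) (s : Int) : List Int :=
  if PySem.Int.floordiv s n < 1 then [-1]
  else
    let st := (PySem.List.pyRange n 0 (-1)).foldl
      (fun st k =>
        let v := PySem.Int.floordiv st.2 k
        (st.1 ++ [v], st.2 - v))
      (([] : List Int), s)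
    st.1

-- ===== PRECONDITION & SPEC =====
-- Pre_ excludes exactly n = 0, where Python's s // n raises ZeroDivisionError.
def Pre_solution (n : Int) (s : Int) : Prop := n ≠ 0
instance (n : Int) (s : Int) : Decidable (Pre_solution n s) := by unfold Pre_solution; infer_instance
def pvWitness_solution : Int × Int := (3, 13)

def Spec_solution (n : Int) (s : Int) (out : List Int) : Prop := out = solution_alt n s
instance (n : Int) (s : Int) (out : List Int) : Decidable (Spec_solution n s out) := by unfold Spec_solution; infer_instance

-- ===== CLAIM (what is proved, stated in full; the proofs are below) =====
def Claim_equal_solution : Prop := ∀ (n : Int) (s : Int), Dom_solution n s → Pre_solution n s → Spec_solution n s (solution n s)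

-- ===== LEMMAS AND PROOFS =====

-- A's increment loop turns the first k slots of replicate N a into a+1.
theorem pv_loop_set (a : Int) (N k : Nat) (hk : k ≤ N) :
    (PySem.List.pyRange 0 (k : Int) 1).foldl
      (fun ans i => PySem.List.pySetD ans i (PySem.List.pyGetD ans i 0 + 1))
      (List.replicate N a)
    = List.replicate k (a + 1) ++ List.replicate (N - k) a := by
  induction k with
  | zero => simp [PySem.List.pyRange_one_eq_nil]
  | succ m ih =>
    have hm : m ≤ N := Nat.le_of_succ_le hk
    have hstep : PySem.List.pyRange 0 ((m : Int) + 1) 1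
        = PySem.List.pyRange 0 (m : Int) 1 ++ [(m : Int)] :=
      PySem.List.pyRange_one_succ_right (by exact_mod_cast Nat.zero_le m)
    have hcast : ((m + 1 : Nat) : Int) = (m : Int) + 1 := by push_cast; ring
    rw [hcast, hstep, List.foldl_append, ih hm]
    simp only [List.foldl_cons, List.foldl_nil]
    have hlen : (List.replicate m (a + 1)).length = m := List.length_replicate
    have hNm : 0 < N - m := by omega
    have hget : PySem.List.pyGetD
        (List.replicate m (a + 1) ++ List.replicate (N - m) a) (m : Int) 0 = a := by
      rw [show ((m : Int)) = ((m : Nat) : Int) from rfl, PySem.List.pyGetD_natCast]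
      rw [List.getD_eq_getElem?_getD, List.getElem?_append_right (by simp)]
      simp [hNm]
    rw [hget]
    rw [show ((m : Int)) = ((m : Nat) : Int) from rfl, PySem.List.pySetD_natCast]
    rw [List.set_append_right _ _ (by simp)]
    simp only [hlen, Nat.sub_self]
    have hrep : (List.replicate (N - m) a).set 0 (a + 1)
        = (a + 1) :: List.replicate (N - m - 1) a := by
      obtain ⟨j, hj⟩ : ∃ j, N - m = j + 1 := ⟨N - m - 1, by omega⟩
      rw [hj]; simp [List.replicate_succ]
    rw [hrep]
    have : List.replicate (m + 1) (a + 1) = List.replicate m (a + 1) ++ [a + 1] := by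
      simp [List.replicate_succ']
    rw [this, List.append_assoc]
    have : N - (m + 1) = N - m - 1 := by omega
    rw [this]
    rfl

theorem pv_mod_pos (x y : Int) (h : 0 < y) : 0 ≤ PySem.Int.mod x y ∧ PySem.Int.mod x y < y := by
  rw [PySem.Int.mod_eq_emod_of_pos (a := x) h]
  exact ⟨Int.emod_nonneg x (by omega), Int.emod_lt_of_pos x h⟩

theorem pv_mod_neg (x y : Int) (h : y < 0) : PySem.Int.mod x y ≤ 0 ∧ y < PySem.Int.mod x y := by
  have h2 := PySem.Int.mod_neg_neg (-x) (-y)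
  simp only [neg_neg] at h2
  have h3 := pv_mod_pos (-x) (-y) (by omega)
  omega

-- A computes, for n ≠ 0 and s // n ≥ 1, the sorted block list directly.
theorem pv_solution_char (n s : Int) (hn : n ≠ 0)
    (hge : ¬ PySem.Int.floordiv s n < 1) :
    solution n s = List.replicate (n - PySem.Int.mod s n).toNat (PySem.Int.floordiv s n)
      ++ List.replicate (PySem.Int.mod s n).toNat (PySem.Int.floordiv s n + 1) := by
  unfold solution
  set a := PySem.Int.floordiv s n with ha
  set b := PySem.Int.mod s n with hbdef
  simp only [hge, if_false]
  rcases lt_or_gt_of_ne hn with hneg | hpos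
  · have hmb := pv_mod_neg s n hneg
    have hb0 : b ≤ 0 := hmb.1
    have h1 : PySem.List.pyRepeat [a] n = ([] : List Int) := by
      rw [PySem.List.pyRepeat_singleton]
      have : n.toNat = 0 := by omega
      simp [this]
    have h2 : PySem.List.pyRange 0 b 1 = [] :=
      PySem.List.pyRange_one_eq_nil hb0
    rw [h1, h2]
    simp only [List.foldl_nil]
    have h3 : (n - b).toNat = 0 := by omega
    have h4 : b.toNat = 0 := by omega
    rw [h3, h4]
    simp [PySem.List.sorted]
  · have hmb := pv_mod_pos s n hpos
    have hb0 : 0 ≤ b := hmb.1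
    have hbn : b < n := hmb.2
    have hbN : b.toNat ≤ n.toNat := by omega
    have hbI : (b.toNat : Int) = b := Int.toNat_of_nonneg hb0
    rw [PySem.List.pyRepeat_singleton,
      show PySem.List.pyRange 0 b 1 = PySem.List.pyRange 0 ((b.toNat : Int)) 1 by rw [hbI],
      pv_loop_set a n.toNat b.toNat hbN]
    have hperm : (List.replicate (n - b).toNat a ++ List.replicate b.toNat (a + 1)).Perm
        (List.replicate b.toNat (a + 1) ++ List.replicate (n.toNat - b.toNat) a) := by
      have : (n - b).toNat = n.toNat - b.toNat := by omega
      rw [this]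
      exact List.perm_append_comm
    have hpw : (List.replicate (n - b).toNat a ++ List.replicate b.toNat (a + 1)).Pairwise
        (· ≤ ·) := by
      apply List.pairwise_append.mpr
      refine ⟨List.pairwise_replicate.mpr (by omega), List.pairwise_replicate.mpr (by omega), ?_⟩
      intro x hx y hy
      rw [List.eq_of_mem_replicate hx, List.eq_of_mem_replicate hy]
      omega
    exact (PySem.List.sorted_id_eq_of_perm_of_pairwise _ _ hperm hpw).symm ▸ rfl

-- B's greedy loop: starting with k slots and remainder a*k + r (0 ≤ r ≤ k),
-- it appends (k - r) copies of a then r copies of a+1 and ends with remainder 0.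
theorem pv_greedy (a : Int) : ∀ (k : Nat), ∀ (r : Nat), r ≤ k → ∀ (acc : List Int),
    (PySem.List.pyRange (k : Int) 0 (-1)).foldl
      (fun st t =>
        let v := PySem.Int.floordiv st.2 t
        (st.1 ++ [v], st.2 - v))
      (acc, a * k + r)
    = (acc ++ List.replicate (k - r) a ++ List.replicate r (a + 1), 0) := by
  intro k
  induction k with
  | zero =>
    intro r hr acc
    interval_cases r
    simp [PySem.List.pyRange_neg_one_eq_nil]
  | succ m ih =>
    intro r hr acc
    have hcons : PySem.List.pyRange ((m + 1 : Nat) : Int) 0 (-1)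
        = ((m + 1 : Nat) : Int) :: PySem.List.pyRange (((m + 1 : Nat) : Int) - 1) 0 (-1) :=
      PySem.List.pyRange_neg_one_cons (by exact_mod_cast Nat.succ_pos m)
    have hsub : ((m + 1 : Nat) : Int) - 1 = (m : Int) := by push_cast; ring
    rw [hcons, hsub]
    simp only [List.foldl_cons]
    by_cases hrm : r = m + 1
    · -- remainder exactly fills every slot: take a+1 here and at every later step
      subst hrm
      have hdiv : PySem.Int.floordiv (a * ((m + 1 : Nat) : Int) + ((m + 1 : Nat) : Int))
          ((m + 1 : Nat) : Int) = a + 1 := by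
        rw [PySem.Int.floordiv_eq_iff_of_pos (by exact_mod_cast Nat.succ_pos m)]
        constructor
        · nlinarith [Int.natCast_nonneg (m + 1)]
        · nlinarith [Int.natCast_pos.mpr (Nat.succ_pos m)]
      have hrem : a * ((m + 1 : Nat) : Int) + ((m + 1 : Nat) : Int) - (a + 1)
          = a * (m : Nat) + (m : Nat) := by push_cast; ring
      simp only [hdiv, hrem]
      rw [ih m (le_refl m) (acc ++ [a + 1])]
      simp [List.replicate_succ]
    · -- at least one plain slot remains: take a here
      have hrm' : r ≤ m := by omega
      have hdiv : PySem.Int.floordiv (a * ((m + 1 : Nat) : Int) + (r : Int))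
          ((m + 1 : Nat) : Int) = a := by
        rw [PySem.Int.floordiv_eq_iff_of_pos (by exact_mod_cast Nat.succ_pos m)]
        constructor
        · nlinarith [Int.natCast_nonneg r]
        · have h1 : (r : Int) < ((m + 1 : Nat) : Int) := by exact_mod_cast Nat.lt_succ_of_le hrm'
          nlinarith
      have hrem : a * ((m + 1 : Nat) : Int) + (r : Int) - a = a * (m : Nat) + (r : Nat) := by
        push_cast; ring
      simp only [hdiv, hrem]
      rw [ih r hrm' (acc ++ [a])]
      have : m + 1 - r = (m - r) + 1 := by omega
      rw [this, List.replicate_succ]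
      simp

theorem solution_eq_alt (n s : Int) (hn : n ≠ 0) : solution n s = solution_alt n s := by
  unfold solution_alt
  by_cases hlt : PySem.Int.floordiv s n < 1
  · simp only [hlt, if_true]
    unfold solution
    simp [hlt]
  · simp only [hlt, if_false]
    rw [pv_solution_char n s hn hlt]
    set a := PySem.Int.floordiv s n with ha
    set b := PySem.Int.mod s n with hbdef
    rcases lt_or_gt_of_ne hn with hneg | hpos
    · -- n < 0: both sides are empty
      have hmb := pv_mod_neg s n hneg
      have h2 : PySem.List.pyRange n 0 (-1) = [] :=
        PySem.List.pyRange_neg_one_eq_nil (le_of_lt hneg)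
      rw [h2]
      have h3 : (n - b).toNat = 0 := by omega
      have h4 : b.toNat = 0 := by omega
      simp [h3, h4]
    · -- n > 0: instantiate the greedy invariant with k = n, r = s % n
      have hmb := pv_mod_pos s n hpos
      have hb0 : 0 ≤ b := hmb.1
      have hbn : b < n := hmb.2
      have hs : a * n + b = s := by
        have := PySem.Int.floordiv_mul_add_mod s n
        rw [← ha, ← hbdef] at this
        linarith
      have hkI : ((n.toNat : Nat) : Int) = n := Int.toNat_of_nonneg (le_of_lt hpos)
      have hrI : ((b.toNat : Nat) : Int) = b := Int.toNat_of_nonneg hb0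
      have hstart : s = a * (n.toNat : Int) + (b.toNat : Int) := by rw [hkI, hrI]; omega
      have hle : b.toNat ≤ n.toNat := by omega
      have := pv_greedy a n.toNat b.toNat hle ([] : List Int)
      rw [hkI, hrI, hs] at this
      have hnb : (n - b).toNat = n.toNat - b.toNat := by omega
      rw [hnb]
      exact (congrArg Prod.fst this).symm

-- ===== VERDICT (by name: the statement is the Claim_ definition above) =====
theorem solution_spec : Claim_equal_solution := by
  intro n s _ hpre
  unfold Spec_solution
  exact solution_eq_alt n s hpre
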